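-- pv_equiv track=rewrite | github.com/BlueJayADAL/SCARP2020-ML | matt/daal/daalAnalyzeDNS.py | obtainNumAndNonnum
-- ===== SOURCE A (Python) =====
-- def obtainNumAndNonnum(url):
-- 	num = 0
-- 	nonnum = 0
-- 	for c in url:
-- 		if c.isdigit():
-- 			num = num+1
-- 		elif c == '.' or c == '*':
-- 			nonnum = nonnum + 1
-- 	return num, nonnum
-- ===== SOURCE B (Python) =====
-- def obtainNumAndNonnum(url):
--     counts = {}
--     for c in url:
--         counts[c] = counts.get(c, 0) + 1
--     num = sum(v for ch, v in counts.items() if ch.isdigit())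
--     nonnum = counts.get('.', 0) + counts.get('*', 0)
--     return num, nonnum
-- ===== Notes on version B (the rewrite author's own statement) =====
-- stated objective: alternative
-- what changed: B first builds a character-frequency table in one dict pass, then derives num by summing the counts of the distinct digit keys and nonnum by two dict lookups, instead of A's single branchy per-character counting loop.
import Mathlib
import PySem

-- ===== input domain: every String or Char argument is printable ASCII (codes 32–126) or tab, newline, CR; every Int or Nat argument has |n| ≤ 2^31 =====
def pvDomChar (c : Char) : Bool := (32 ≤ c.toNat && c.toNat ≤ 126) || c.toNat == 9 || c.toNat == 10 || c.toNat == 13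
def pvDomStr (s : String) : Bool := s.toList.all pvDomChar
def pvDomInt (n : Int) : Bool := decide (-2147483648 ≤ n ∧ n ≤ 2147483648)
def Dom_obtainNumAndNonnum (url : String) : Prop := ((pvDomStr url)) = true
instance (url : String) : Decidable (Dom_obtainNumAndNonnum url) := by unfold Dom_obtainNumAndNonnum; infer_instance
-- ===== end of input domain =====

-- B builds a character-frequency table first and reads the two answers off the table; same O(n) cost, different shape.

-- ===== PORT A =====
def obtainNumAndNonnum (url : String) : Int × Int :=
  url.toList.foldl
    (fun (s : Int × Int) c =>
      if PySem.Chars.isdigit c then (s.1 + 1, s.2)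
      else if c == '.' || c == '*' then (s.1, s.2 + 1)
      else s)
    ((0 : Int), (0 : Int))

-- ===== PORT B =====
def obtainNumAndNonnum_alt (url : String) : Int × Int :=
  let counts : PySem.Dict Char Int :=
    url.toList.foldl (fun d c => d.insert c (d.getD c 0 + 1)) PySem.Dict.empty
  let num : Int := ((counts.items.filter (fun p => PySem.Chars.isdigit p.1)).map Prod.snd).sum
  let nonnum : Int := counts.getD '.' 0 + counts.getD '*' 0
  (num, nonnum)

-- ===== PRECONDITION & SPEC =====
def Spec_obtainNumAndNonnum (url : String) (out : Int × Int) : Prop := out = obtainNumAndNonnum_alt url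
instance (url : String) (out : Int × Int) : Decidable (Spec_obtainNumAndNonnum url out) := by unfold Spec_obtainNumAndNonnum; infer_instance

-- ===== CLAIM (what is proved, stated in full; the proofs are below) =====
def Claim_equal_obtainNumAndNonnum : Prop := ∀ (url : String), Dom_obtainNumAndNonnum url → Spec_obtainNumAndNonnum url (obtainNumAndNonnum url)

-- ===== LEMMAS AND PROOFS =====

-- A's loop counts digit chars in the first slot, '.'/'*' chars in the second.
theorem loopA_eq (l : List Char) (n m : Int) :
    l.foldl
      (fun (s : Int × Int) c =>
        if PySem.Chars.isdigit c then (s.1 + 1, s.2)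
        else if c == '.' || c == '*' then (s.1, s.2 + 1)
        else s)
      (n, m)
    = (n + (l.countP (fun c => PySem.Chars.isdigit c) : Int),
       m + (l.count '.' : Int) + (l.count '*' : Int)) := by
  induction l generalizing n m with
  | nil => simp
  | cons c t ih =>
    rw [List.foldl_cons]
    by_cases hd : PySem.Chars.isdigit c = true
    · have h1 : c ≠ '.' := by rintro rfl; simp [PySem.Chars.isdigit] at hd
      have h2 : c ≠ '*' := by rintro rfl; simp [PySem.Chars.isdigit] at hd
      rw [if_pos hd, show (((n, m) : Int × Int).1 + 1, ((n, m) : Int × Int).2) = (n + 1, m) from rfl,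
        ih]
      simp [hd, h1, h2]
      omega
    · by_cases hor : (c == '.' || c == '*') = true
      · rw [if_neg hd, if_pos hor,
          show (((n, m) : Int × Int).1, ((n, m) : Int × Int).2 + 1) = (n, m + 1) from rfl, ih]
        rcases (by simpa using hor) with h | h <;> subst h <;>
          simp [hd] <;> omega
      · rw [if_neg hd, if_neg hor, show (((n, m) : Int × Int) : Int × Int) = (n, m) from rfl, ih]
        have h1 : c ≠ '.' := by intro h; subst h; simp at hor
        have h2 : c ≠ '*' := by intro h; subst h; simp at hor
        simp [hd, h1, h2]

-- summing the multiplicities of the distinct keys satisfying p = countP over the list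
theorem sum_distinct_counts (xs : List Char) (p : Char → Bool) :
    (((PySem.Set.ofList xs).filter p).map (fun k => (xs.count k : Int))).sum
      = (xs.countP p : Int) := by
  have hperm : (PySem.Set.ofList xs : List Char).Perm xs.dedup := by
    rw [List.perm_ext_iff_of_nodup (PySem.Set.nodup_ofList xs) xs.nodup_dedup]
    intro a
    simp [PySem.Set.mem_ofList, List.mem_dedup]
  have h2 : (((PySem.Set.ofList xs).filter p).map (fun k => (xs.count k : Int))).sum
      = ((xs.dedup.filter p).map (fun k => (xs.count k : Int))).sum :=
    ((hperm.filter p).map _).sum_eq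
  have h3 := List.sum_map_count_dedup_filter_eq_countP p xs
  rw [h2, show ((xs.dedup.filter p).map (fun k => (xs.count k : Int)))
      = ((xs.dedup.filter p).map (fun k => xs.count k)).map (fun n : Nat => (n : Int)) from by
        rw [List.map_map]; rfl,
    ← Nat.cast_list_sum, h3]

-- ===== VERDICT (by name: the statement is the Claim_ definition above) =====
theorem obtainNumAndNonnum_spec : Claim_equal_obtainNumAndNonnum := by
  intro url _
  unfold Spec_obtainNumAndNonnum obtainNumAndNonnum obtainNumAndNonnum_alt
  rw [loopA_eq]
  simp only [PySem.Dict.foldl_insert_getD_add_one_eq_counter, PySem.Dict.items_counter,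
    PySem.Dict.getD_counter, List.filter_map, List.map_map, Function.comp_def]
  rw [sum_distinct_counts]
  simp
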